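-- pv_equiv track=rewrite | github.com/beytullaharslannn/SOC-Advanced-Toolkit | crypto_module.py | rot18
-- ===== SOURCE A (Python) =====
-- def rot18(t):
--     result = []
--     for c in t:
--         if c.isalpha():
--             base = 65 if c.isupper() else 97
--             result.append(chr((ord(c)-base+13)%26+base))
--         elif c.isdigit(): result.append(chr((ord(c)-48+5)%10+48))
--         else: result.append(c)
--     return "".join(result)
-- ===== SOURCE B (Python) =====
-- _SRC = "ABCDEFGHIJKLMNOPQRSTUVWXYZabcdefghijklmnopqrstuvwxyz0123456789"
-- _DST = "NOPQRSTUVWXYZABCDEFGHIJKLMnopqrstuvwxyzabcdefghijklm5678901234"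
-- _TABLE = str.maketrans(_SRC, _DST)
--
-- def rot18(t):
--     return t.translate(_TABLE)
-- ===== Notes on version B (the rewrite author's own statement) =====
-- stated objective: idiomatic
-- what changed: Replaced the per-character branch-and-arithmetic loop by a translation table (str.maketrans over the 62 letters/digits) applied with a single str.translate call.
import Mathlib
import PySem

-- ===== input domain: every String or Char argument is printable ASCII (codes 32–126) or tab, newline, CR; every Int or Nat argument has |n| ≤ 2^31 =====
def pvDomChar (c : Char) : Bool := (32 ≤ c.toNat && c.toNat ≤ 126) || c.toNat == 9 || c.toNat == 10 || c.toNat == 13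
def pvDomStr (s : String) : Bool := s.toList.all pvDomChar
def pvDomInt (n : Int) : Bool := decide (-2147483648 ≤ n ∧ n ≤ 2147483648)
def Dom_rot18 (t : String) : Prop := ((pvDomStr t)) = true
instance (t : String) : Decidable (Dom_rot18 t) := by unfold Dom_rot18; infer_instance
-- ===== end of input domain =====

set_option maxRecDepth 4000


-- B replaces A's per-character branch/arithmetic loop by a 62-entry translation table applied in one lookup pass (idiomatic str.maketrans/translate).

-- ===== PORT A =====
-- per-character step of A's loop body (what gets appended for c)
def rot18Step (c : Char) : Char :=
  if PySem.Chars.isalpha c then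
    let base : Int := if PySem.Chars.isupper c then 65 else 97
    Char.ofNat (PySem.Int.mod ((c.toNat : Int) - base + 13) 26 + base).toNat
  else if PySem.Chars.isdigit c then
    Char.ofNat (PySem.Int.mod ((c.toNat : Int) - 48 + 5) 10 + 48).toNat
  else c

def rot18 (t : String) : String :=
  String.ofList (t.toList.foldl (fun result c => result ++ [rot18Step c]) [])

-- ===== PORT B =====
-- the translation table: str.maketrans(_SRC, _DST) as a dict Char → Char
def rot18Table : PySem.Dict Char Char :=
  (List.zip "ABCDEFGHIJKLMNOPQRSTUVWXYZabcdefghijklmnopqrstuvwxyz0123456789".toList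
            "NOPQRSTUVWXYZABCDEFGHIJKLMnopqrstuvwxyzabcdefghijklm5678901234".toList).foldl
    (fun d p => d.insert p.1 p.2) PySem.Dict.empty

-- t.translate(table): table lookup per character, untouched if absent
def rot18_alt (t : String) : String :=
  String.ofList (t.toList.map (fun c => rot18Table.getD c c))

-- ===== PRECONDITION & SPEC =====
def Spec_rot18 (t : String) (out : String) : Prop := out = rot18_alt t
instance (t : String) (out : String) : Decidable (Spec_rot18 t out) := by unfold Spec_rot18; infer_instance

-- ===== CLAIM (what is proved, stated in full; the proofs are below) =====
def Claim_equal_rot18 : Prop := ∀ (t : String), Dom_rot18 t → Spec_rot18 t (rot18 t)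

-- ===== LEMMAS AND PROOFS =====

theorem rot18_foldl_eq_map (l acc : List Char) :
    l.foldl (fun result c => result ++ [rot18Step c]) acc = acc ++ l.map rot18Step := by
  induction l generalizing acc with
  | nil => simp
  | cons c l ih => simp [List.foldl, ih]

theorem rot18_step_eq_nat : ∀ n : Nat, n < 127 →
    rot18Step (Char.ofNat n) = (rot18Table.getD (Char.ofNat n) (Char.ofNat n)) := by
  decide

theorem rot18_step_eq (c : Char) (h : pvDomChar c = true) :
    rot18Step c = rot18Table.getD c c := by
  have hlt : c.toNat < 127 := by
    simp [pvDomChar] at h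
    omega
  have hc : Char.ofNat c.toNat = c := Char.ofNat_toNat c
  have := rot18_step_eq_nat c.toNat hlt
  rwa [hc] at this

-- ===== VERDICT (by name: the statement is the Claim_ definition above) =====
theorem rot18_spec : Claim_equal_rot18 := by
  intro t hdom
  unfold Spec_rot18 rot18 rot18_alt
  rw [rot18_foldl_eq_map, List.nil_append]
  congr 1
  apply List.map_congr_left
  intro c hc
  apply rot18_step_eq c
  have hall : ∀ x ∈ t.toList, pvDomChar x = true := by
    simpa [Dom_rot18, pvDomStr, List.all_eq_true] using hdom
  exact hall c hc
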